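-- pv_equiv track=rewrite | github.com/cmbi/kmad-web | kman_web/services/convert.py | encode_slims
-- ===== SOURCE A (Python) =====
-- def encode_slims(seq, slims, slim_codes):
--     for i, slimI in enumerate(slims):
--         if len(slimI) > 0:
--             start = slimI[0]
--             end = slimI[1]
--             slimsCode = slim_codes[i]
--             k = 0
--             j = 0
--             while j < end + 1 and k < len(seq):
--                 if k % 7 == 5 and j >= start:
--                     seq[k] = slimsCode[0]
--                     seq[k+1] = slimsCode[1]
--                 elif k % 7 == 0 and seq[k] != "-":
--                     j += 1
--                 k += 1
--     return seq
-- ===== SOURCE B (Python) =====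
-- def _j_profile(seq):
--     # J[m] = number of non-'-' entries among seq[0], seq[7], ..., seq[7*m]
--     # (the value of A's residue counter j at write position 7*m+5); nondecreasing.
--     J = []
--     c = 0
--     m = 0
--     n = len(seq)
--     while 7 * m + 5 < n:
--         if seq[7 * m] != "-":
--             c += 1
--         J.append(c)
--         m += 1
--     return J
--
--
-- def _lower_bound(J, x):
--     # first index i with J[i] >= x (J nondecreasing); hand-rolled bisect_left
--     lo = 0
--     hi = len(J)
--     while lo < hi:
--         mid = (lo + hi) // 2
--         if J[mid] < x:
--             lo = mid + 1
--         else: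
--             hi = mid
--     return lo
--
--
-- def encode_slims(seq, slims, slim_codes):
--     # precompute the column->residue-count profile once, then write each slim's
--     # block range [lo, hi) directly, found by binary search (mutates seq like A)
--     J = _j_profile(seq)
--     for slimI, code in zip(slims, slim_codes):
--         if slimI:
--             lo = _lower_bound(J, slimI[0])
--             hi = _lower_bound(J, slimI[1] + 1)
--             for m in range(lo, hi):
--                 p = 7 * m + 5
--                 seq[p] = code[0]
--                 seq[p + 1] = code[1]
--     return seq
-- ===== Notes on version B (the rewrite author's own statement) =====
-- stated objective: faster
-- what changed: Instead of re-walking every sequence cell per slim with a stateful j/k while-loop, B precomputes the column->residue-count profile once, binary-searches each slim's [start,end] to a contiguous block range, and writes only those cells.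
import Mathlib
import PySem

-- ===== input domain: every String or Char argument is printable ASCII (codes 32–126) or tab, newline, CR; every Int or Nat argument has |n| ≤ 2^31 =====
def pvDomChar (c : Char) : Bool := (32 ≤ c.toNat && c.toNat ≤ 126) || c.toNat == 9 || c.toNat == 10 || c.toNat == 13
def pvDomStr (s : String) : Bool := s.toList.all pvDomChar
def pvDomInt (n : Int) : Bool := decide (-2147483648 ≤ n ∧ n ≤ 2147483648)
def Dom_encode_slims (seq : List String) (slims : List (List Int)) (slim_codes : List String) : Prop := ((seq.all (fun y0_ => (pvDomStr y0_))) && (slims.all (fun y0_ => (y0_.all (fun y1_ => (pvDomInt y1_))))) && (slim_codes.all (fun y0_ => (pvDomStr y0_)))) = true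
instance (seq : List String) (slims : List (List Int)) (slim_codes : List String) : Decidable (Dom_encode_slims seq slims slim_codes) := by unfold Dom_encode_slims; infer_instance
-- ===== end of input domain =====

-- B replaces A's per-slim stateful walk over every cell by one precomputed residue-count
-- profile plus a binary-searched block range per slim; both A and B mutate `seq` in place in
-- Python (the same writes), the equivalence proved here is about the returned value.

-- ===== PORT A =====
/-- `slimsCode[i]` as a one-character string; `""` out of range (Python raises there; `Pre_` excludes it). -/
def pvCode (code : String) (i : Nat) : String :=
  match code.toList[i]? with
  | some c => String.singleton c
  | none => ""

/-- A's inner `while j < end + 1 and k < len(seq)` loop.  `k` only counts up from 0, so a `Nat`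
counter is exact; `j` is compared with the slim's `Int` bounds.  `seq[k] = …` is `List.set`
(exact in range; the out-of-range `seq[k+1]` where Python raises IndexError is excluded by `Pre_`). -/
def pvA_loop (code : String) (start fin : Int) (s : List String) (j : Int) (k : Nat) : List String :=
  if h : j < fin + 1 ∧ k < s.length then
    if k % 7 = 5 ∧ start ≤ j then
      pvA_loop code start fin ((s.set k (pvCode code 0)).set (k+1) (pvCode code 1)) j (k+1)
    else if k % 7 = 0 ∧ s.getD k "" ≠ "-" then
      pvA_loop code start fin s (j+1) (k+1)
    else
      pvA_loop code start fin s j (k+1)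
  else s
termination_by s.length - k
decreasing_by all_goals simp_all [List.length_set]; omega

def encode_slims (seq : List String) (slims : List (List Int)) (slim_codes : List String) : List String :=
  (PySem.List.enumerate slims 0).foldl
    (fun s p =>
      if p.2.length > 0 then
        pvA_loop (PySem.List.pyGetD slim_codes p.1 "") (p.2.getD 0 0) (p.2.getD 1 0) s 0 0
      else s) seq

-- ===== PORT B =====
/-- B's `_j_profile` while-loop (`c`, the running count, is a Python int). -/
def pvB_profile (seq : List String) (J : List Int) (c : Int) (m : Nat) : List Int :=
  if h : 7*m+5 < seq.length then
    let c' := if seq.getD (7*m) "" ≠ "-" then c + 1 else c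
    pvB_profile seq (J ++ [c']) c' (m+1)
  else J
termination_by seq.length - m
decreasing_by omega

/-- B's `_lower_bound` (`lo`, `hi` stay in `[0, len J]`, so `Nat` counters are exact;
`(lo+hi)//2` on nonnegative ints is `Nat` division). -/
def pvB_lower (J : List Int) (x : Int) (lo hi : Nat) : Nat :=
  if h : lo < hi then
    let mid := (lo + hi) / 2
    if J.getD mid 0 < x then pvB_lower J x (mid+1) hi else pvB_lower J x lo mid
  else lo
termination_by hi - lo
decreasing_by all_goals omega

/-- the two assignments of B's innermost loop body at block `m` (`p = 7*m+5`). -/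
def pvB_write (code : String) (s : List String) (m : Nat) : List String :=
  (s.set (7*m+5) (pvCode code 0)).set (7*m+6) (pvCode code 1)

def encode_slims_alt (seq : List String) (slims : List (List Int)) (slim_codes : List String) : List String :=
  let J := pvB_profile seq [] 0 0
  (slims.zip slim_codes).foldl
    (fun s q =>
      if q.1.length > 0 then
        let lo := pvB_lower J (q.1.getD 0 0) 0 J.length
        let hi := pvB_lower J (q.1.getD 1 0 + 1) 0 J.length
        (List.range' lo (hi - lo)).foldl (fun s m => pvB_write q.2 s m) s
      else s) seq

-- ===== PRECONDITION & SPEC =====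
/-- A's residue counter `j` at the write position `7*m+5` of block `m`:
the number of non-`"-"` cells among `seq[0], seq[7], …, seq[7*m]`. -/
def pvJval (seq : List String) (m : Nat) : Int :=
  ((List.range (m+1)).filter (fun t => seq.getD (7*t) "" ≠ "-")).length

/-- block `m` gets written for a slim `[start, fin]` iff its write cell exists and
`start ≤ j ≤ fin` there. -/
def pvSel (seq : List String) (start fin : Int) (m : Nat) : Prop :=
  7*m+5 < seq.length ∧ start ≤ pvJval seq m ∧ pvJval seq m ≤ fin

-- Pre_: exactly the inputs on which the Python A returns (no IndexError): every nonempty slim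
-- has at least 2 entries and a code, and wherever a write actually fires the code has at least
-- 2 characters and the partner cell k+1 is still inside the sequence.
def Pre_encode_slims (seq : List String) (slims : List (List Int)) (slim_codes : List String) : Prop :=
  ∀ i ∈ List.range slims.length, slims.getD i [] ≠ [] →
    2 ≤ (slims.getD i []).length ∧ i < slim_codes.length ∧
    ∀ m ∈ List.range seq.length, pvSel seq ((slims.getD i []).getD 0 0) ((slims.getD i []).getD 1 0) m →
      2 ≤ (slim_codes.getD i "").toList.length ∧ 7*m+6 ≠ seq.length
instance (seq : List String) (slims : List (List Int)) (slim_codes : List String) : Decidable (Pre_encode_slims seq slims slim_codes) := by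
  unfold Pre_encode_slims pvSel; infer_instance

def pvWitness_encode_slims : List String × List (List Int) × List String :=
  (["A", "-", "B", "C", "D", "E", "F", "A"], [[0, 5]], ["ab"])

def Spec_encode_slims (seq : List String) (slims : List (List Int)) (slim_codes : List String) (out : List String) : Prop := out = encode_slims_alt seq slims slim_codes
instance (seq : List String) (slims : List (List Int)) (slim_codes : List String) (out : List String) : Decidable (Spec_encode_slims seq slims slim_codes out) := by unfold Spec_encode_slims; infer_instance

-- ===== CLAIM (what is proved, stated in full; the proofs are below) =====
def Claim_equal_encode_slims : Prop := ∀ (seq : List String) (slims : List (List Int)) (slim_codes : List String), Dom_encode_slims seq slims slim_codes → Pre_encode_slims seq slims slim_codes → Spec_encode_slims seq slims slim_codes (encode_slims seq slims slim_codes)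

-- ===== LEMMAS AND PROOFS =====

/-- number of blocks that have a write cell: `m < pvM n ↔ 7*m+5 < n`. -/
def pvM (n : Nat) : Nat := (n + 1) / 7

/-- `j` at the TOP of block `b` (before its residue cell is counted). -/
def pvJpre (seq : List String) (b : Nat) : Int :=
  ((List.range b).filter (fun t => seq.getD (7*t) "" ≠ "-")).length

/-- one conditional write of the common specification fold. -/
def pvStep (code : String) (start fin : Int) (seq : List String) (s : List String) (m : Nat) : List String :=
  if start ≤ pvJval seq m ∧ pvJval seq m ≤ fin then pvB_write code s m else s

lemma pvJval_eq_jpre (seq : List String) (m : Nat) : pvJval seq m = pvJpre seq (m+1) := rfl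

lemma pvJpre_succ (seq : List String) (b : Nat) :
    pvJpre seq (b+1) = pvJpre seq b + (if seq.getD (7*b) "" ≠ "-" then 1 else 0) := by
  simp only [pvJpre, List.range_succ, List.filter_append, List.length_append]
  simp only [List.filter_cons, List.filter_nil]
  split <;> simp_all [List.getD]

lemma pvJpre_mono (seq : List String) {b b' : Nat} (h : b ≤ b') : pvJpre seq b ≤ pvJpre seq b' := by
  induction b' with
  | zero => simp [Nat.le_zero.mp h]
  | succ n ih =>
    by_cases hb : b = n + 1
    · simp [hb]
    · have h1 := ih (by omega)
      rw [pvJpre_succ]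
      split <;> omega

lemma pvJval_mono (seq : List String) {m m' : Nat} (h : m ≤ m') : pvJval seq m ≤ pvJval seq m' := by
  simpa [pvJval_eq_jpre] using pvJpre_mono seq (Nat.succ_le_succ h)

lemma pvFoldl_id {α β : Type} (l : List β) (f : α → β → α) (s : α)
    (h : ∀ m ∈ l, ∀ s', f s' m = s') : l.foldl f s = s := by
  induction l generalizing s with
  | nil => rfl
  | cons x xs ih => simp only [List.foldl_cons, h x (by simp)]; exact ih s (fun m hm s' => h m (by simp [hm]) s')

lemma pvStep_skip {code : String} {start fin : Int} {seq : List String} {b : Nat}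
    (hj : fin + 1 ≤ pvJpre seq (b+1)) :
    ∀ m ∈ List.range' b (pvM seq.length - b), ∀ s', pvStep code start fin seq s' m = s' := by
  intro m hm s'
  have hbm : b ≤ m := (List.mem_range'_1.mp hm).1
  have : pvJpre seq (b+1) ≤ pvJval seq m := by
    rw [pvJval_eq_jpre]; exact pvJpre_mono seq (by omega)
  simp only [pvStep]
  rw [if_neg]; omega

lemma pvGetD_set_ne (s : List String) (v : String) {i p : Nat} (h : i ≠ p) :
    (s.set i v).getD p "" = s.getD p "" := by
  simp [List.getD, List.getElem?_set_ne h]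

lemma pvB_write_len (code : String) (s : List String) (m : Nat) :
    (pvB_write code s m).length = s.length := by simp [pvB_write]

lemma pvB_write_getD (code : String) (s : List String) (m t : Nat) :
    (pvB_write code s m).getD (7*t) "" = s.getD (7*t) "" := by
  unfold pvB_write
  rw [pvGetD_set_ne _ _ (by omega), pvGetD_set_ne _ _ (by omega)]

lemma pvStep_len (code : String) (start fin : Int) (seq s : List String) (m : Nat) :
    (pvStep code start fin seq s m).length = s.length := by
  unfold pvStep; split
  · exact pvB_write_len code s m
  · rfl

lemma pvStep_getD (code : String) (start fin : Int) (seq s : List String) (m t : Nat) :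
    (pvStep code start fin seq s m).getD (7*t) "" = s.getD (7*t) "" := by
  unfold pvStep; split
  · exact pvB_write_getD code s m t
  · rfl

/-- A's tail: from a position `k` past every remaining write cell the loop never writes. -/
lemma pvA_tail (code : String) (start fin : Int) :
    ∀ s (j : Int) (k : Nat), (∀ k', k ≤ k' → k' % 7 = 5 → s.length ≤ k') →
      pvA_loop code start fin s j k = s := by
  have main : ∀ fuel s (j : Int) (k : Nat), s.length - k ≤ fuel →
      (∀ k', k ≤ k' → k' % 7 = 5 → s.length ≤ k') → pvA_loop code start fin s j k = s := by
    intro fuel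
    induction fuel with
    | zero =>
      intro s j k hf h
      rw [pvA_loop, dif_neg]
      rintro ⟨-, hk⟩; omega
    | succ n ih =>
      intro s j k hf h
      rw [pvA_loop]
      split
      · rename_i hg
        rw [if_neg (by rintro ⟨h5, -⟩; exact absurd (h k le_rfl h5) (by omega))]
        split
        · exact ih s (j+1) (k+1) (by omega) (fun k' hk' => h k' (by omega))
        · exact ih s j (k+1) (by omega) (fun k' hk' => h k' (by omega))
      · rfl
  exact fun s j k h => main (s.length - k) s j k le_rfl h

/-- one block of A's loop, from just after its residue cell: it performs exactly the
conditional write of block `b` and moves on (or exits). -/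
lemma pvA_block (code : String) (start fin : Int) (seq : List String) (b : Nat) (s : List String)
    (hlen : s.length = seq.length) (hb5 : 7*b+5 < seq.length) :
    pvA_loop code start fin s (pvJval seq b) (7*b+1)
      = if fin + 1 ≤ pvJval seq b then s
        else if 7*b+6 = seq.length then pvStep code start fin seq s b
        else pvA_loop code start fin (pvStep code start fin seq s b) (pvJval seq b) (7*b+7) := by
  set j1 := pvJval seq b with hj1
  by_cases hj : fin + 1 ≤ j1
  · rw [if_pos hj, pvA_loop, dif_neg (by rintro ⟨h1, -⟩; omega)]
  rw [if_neg hj]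
  -- k = 7b+1 .. 7b+4: nothing happens
  rw [pvA_loop, dif_pos ⟨by omega, by omega⟩,
      if_neg (by rintro ⟨h5, -⟩; omega), if_neg (by rintro ⟨h0, -⟩; omega)]
  rw [pvA_loop, dif_pos ⟨by omega, by omega⟩,
      if_neg (by rintro ⟨h5, -⟩; omega), if_neg (by rintro ⟨h0, -⟩; omega)]
  rw [pvA_loop, dif_pos ⟨by omega, by omega⟩,
      if_neg (by rintro ⟨h5, -⟩; omega), if_neg (by rintro ⟨h0, -⟩; omega)]
  rw [pvA_loop, dif_pos ⟨by omega, by omega⟩,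
      if_neg (by rintro ⟨h5, -⟩; omega), if_neg (by rintro ⟨h0, -⟩; omega)]
  -- k = 7b+5: the write cell
  have harith : 7*b+1+1+1+1+1 = 7*b+5 := by omega
  rw [harith, pvA_loop, dif_pos ⟨by omega, by omega⟩]
  have hs' : ∀ s' : List String, s'.length = seq.length → pvA_loop code start fin s' j1 (7*b+5+1)
      = if 7*b+6 = seq.length then s' else pvA_loop code start fin s' j1 (7*b+7) := by
    intro s' hlen'
    by_cases hend : 7*b+6 = seq.length
    · rw [if_pos hend, pvA_loop, dif_neg (by rintro ⟨-, hk⟩; omega)]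
    · rw [if_neg hend, pvA_loop, dif_pos ⟨by omega, by omega⟩,
          if_neg (by rintro ⟨h5, -⟩; omega), if_neg (by rintro ⟨h0, -⟩; omega)]
  by_cases hst : start ≤ j1
  · rw [if_pos ⟨by omega, hst⟩]
    have hw : ((s.set (7*b+5) (pvCode code 0)).set (7*b+5+1) (pvCode code 1))
        = pvStep code start fin seq s b := by
      unfold pvStep
      rw [if_pos ⟨hst, by omega⟩]
      rfl
    rw [hw, hs' _ (by rw [pvStep_len]; exact hlen)]
  · rw [if_neg (by rintro ⟨-, hc⟩; exact hst hc), if_neg (by rintro ⟨h0, -⟩; omega)]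
    have hns : s = pvStep code start fin seq s b := by
      unfold pvStep; rw [if_neg (by rintro ⟨hc, -⟩; exact hst hc)]
    rw [hs' _ hlen, ← hns]

/-- main characterisation of A's inner loop as the conditional spec fold over the blocks. -/
lemma pvA_loop_eq (code : String) (start fin : Int) (seq : List String) :
    ∀ b s, s.length = seq.length →
      (∀ t, 7*t < seq.length → s.getD (7*t) "" = seq.getD (7*t) "") →
      pvA_loop code start fin s (pvJpre seq b) (7*b)
        = (List.range' b (pvM seq.length - b)).foldl (pvStep code start fin seq) s := by
  have main : ∀ fuel b s, pvM seq.length - b ≤ fuel → s.length = seq.length →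
      (∀ t, 7*t < seq.length → s.getD (7*t) "" = seq.getD (7*t) "") →
      pvA_loop code start fin s (pvJpre seq b) (7*b)
        = (List.range' b (pvM seq.length - b)).foldl (pvStep code start fin seq) s := by
    intro fuel
    induction fuel with
    | zero =>
      intro b s hf hlen hagree
      have hbM : pvM seq.length ≤ b := by omega
      have hM : pvM seq.length = (seq.length + 1) / 7 := rfl
      rw [Nat.sub_eq_zero_of_le hbM]
      simp only [List.range'_zero, List.foldl_nil]
      exact pvA_tail code start fin s _ (7*b) (fun k' hk' h5 => by omega)
    | succ n ih =>
      intro b s hf hlen hagree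
      have hM : pvM seq.length = (seq.length + 1) / 7 := rfl
      by_cases hbM : pvM seq.length ≤ b
      · rw [Nat.sub_eq_zero_of_le hbM]
        simp only [List.range'_zero, List.foldl_nil]
        exact pvA_tail code start fin s _ (7*b) (fun k' hk' h5 => by omega)
      have hb5 : 7*b+5 < seq.length := by omega
      by_cases hj0 : fin + 1 ≤ pvJpre seq b
      · rw [pvA_loop, dif_neg (by rintro ⟨h1, -⟩; omega)]
        refine (pvFoldl_id _ _ _ ?_).symm
        exact pvStep_skip (le_trans hj0 (pvJpre_mono seq (by omega)))
      -- the residue cell k = 7b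
      rw [pvA_loop, dif_pos ⟨by omega, by omega⟩,
          if_neg (by rintro ⟨h5, -⟩; omega)]
      have hread : s.getD (7*b) "" = seq.getD (7*b) "" := hagree b (by omega)
      have hsucc := pvJpre_succ seq b
      have hstep : ∀ j' : Int, j' = pvJpre seq (b+1) →
          pvA_loop code start fin s j' (7*b+1)
            = (List.range' b (pvM seq.length - b)).foldl (pvStep code start fin seq) s := by
        intro j' hj'
        rw [hj', ← pvJval_eq_jpre]
        rw [pvA_block code start fin seq b s hlen hb5]
        by_cases hj1 : fin + 1 ≤ pvJval seq b
        · rw [if_pos hj1]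
          refine (pvFoldl_id _ _ _ ?_).symm
          exact pvStep_skip (by rwa [← pvJval_eq_jpre])
        rw [if_neg hj1]
        by_cases hend : 7*b+6 = seq.length
        · rw [if_pos hend]
          have hM1 : pvM seq.length - b = 1 := by omega
          rw [hM1]
          simp [List.range'_succ]
        · rw [if_neg hend]
          have h7 : 7*b+7 = 7*(b+1) := by omega
          rw [h7, pvJval_eq_jpre]
          have hrange : pvM seq.length - b = (pvM seq.length - (b+1)) + 1 := by omega
          rw [ih (b+1) (pvStep code start fin seq s b) (by omega)
                (by rw [pvStep_len]; exact hlen)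
                (fun t ht => (pvStep_getD code start fin seq s b t).trans (hagree t ht)),
              hrange, List.range'_succ]
          simp only [List.foldl_cons]
      by_cases hc : s.getD (7*b) "" ≠ "-"
      · rw [if_pos ⟨by omega, hc⟩]
        refine hstep _ ?_
        rw [hsucc, hread] at *
        split <;> simp_all
      · rw [if_neg (by rintro ⟨-, hcc⟩; exact hc hcc)]
        refine hstep _ ?_
        rw [hsucc]
        rw [hread] at hc
        simp at hc
        simp [hc]
  exact fun b s hlen hagree => main (pvM seq.length - b) b s le_rfl hlen hagree

/-- B's profile loop builds exactly the `pvJval` table. -/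
lemma pvB_profile_eq (seq : List String) :
    ∀ m, m ≤ pvM seq.length →
      pvB_profile seq ((List.range m).map (pvJval seq)) (pvJpre seq m) m
        = (List.range (pvM seq.length)).map (pvJval seq) := by
  have main : ∀ fuel m, pvM seq.length - m ≤ fuel → m ≤ pvM seq.length →
      pvB_profile seq ((List.range m).map (pvJval seq)) (pvJpre seq m) m
        = (List.range (pvM seq.length)).map (pvJval seq) := by
    intro fuel
    induction fuel with
    | zero =>
      intro m hf hm
      have hmM : m = pvM seq.length := by omega
      rw [pvB_profile, dif_neg (by simp only [pvM] at hmM; omega)]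
      rw [hmM]
    | succ n ih =>
      intro m hf hm
      by_cases hlt : m < pvM seq.length
      · rw [pvB_profile, dif_pos (by simp only [pvM] at hlt; omega)]
        have hc : (if seq.getD (7*m) "" ≠ "-" then pvJpre seq m + 1 else pvJpre seq m)
            = pvJpre seq (m+1) := by
          rw [pvJpre_succ]; split <;> simp_all
        show pvB_profile seq ((List.range m).map (pvJval seq) ++
            [if seq.getD (7*m) "" ≠ "-" then pvJpre seq m + 1 else pvJpre seq m])
            (if seq.getD (7*m) "" ≠ "-" then pvJpre seq m + 1 else pvJpre seq m) (m+1) = _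
        rw [hc]
        have harr : (List.range m).map (pvJval seq) ++ [pvJpre seq (m+1)]
            = (List.range (m+1)).map (pvJval seq) := by
          rw [List.range_succ, List.map_append]
          simp [pvJval_eq_jpre]
        rw [harr]
        exact ih (m+1) (by omega) (by omega)
      · have hmM : m = pvM seq.length := by omega
        rw [pvB_profile, dif_neg (by simp only [pvM] at hmM; omega)]
        rw [hmM]
  exact fun m hm => main (pvM seq.length - m) m le_rfl hm

lemma pvB_profile_spec (seq : List String) :
    pvB_profile seq [] 0 0 = (List.range (pvM seq.length)).map (pvJval seq) := by
  simpa [pvJpre] using pvB_profile_eq seq 0 (Nat.zero_le _)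

/-- `_lower_bound` on the monotone profile: the returned index splits the blocks at `x`. -/
lemma pvB_lower_spec (seq : List String) (x : Int) :
    ∀ fuel lo hi, hi - lo ≤ fuel → lo ≤ hi → hi ≤ pvM seq.length →
      (∀ m, m < pvM seq.length → m < lo → pvJval seq m < x) →
      (∀ m, m < pvM seq.length → hi ≤ m → x ≤ pvJval seq m) →
      lo ≤ pvB_lower ((List.range (pvM seq.length)).map (pvJval seq)) x lo hi ∧
      pvB_lower ((List.range (pvM seq.length)).map (pvJval seq)) x lo hi ≤ hi ∧
      ∀ m, m < pvM seq.length →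
        (x ≤ pvJval seq m ↔ pvB_lower ((List.range (pvM seq.length)).map (pvJval seq)) x lo hi ≤ m) := by
  have hbase : ∀ (J : List Int) lo hi, ¬ lo < hi → pvB_lower J x lo hi = lo := by
    intro J lo hi h; rw [pvB_lower, dif_neg h]
  have hstep : ∀ (J : List Int) lo hi, lo < hi →
      pvB_lower J x lo hi = if J.getD ((lo+hi)/2) 0 < x
        then pvB_lower J x ((lo+hi)/2+1) hi else pvB_lower J x lo ((lo+hi)/2) := by
    intro J lo hi h; rw [pvB_lower, dif_pos h]
  intro fuel
  induction fuel with
  | zero =>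
    intro lo hi hf hlh hhM h1 h2
    have heq : lo = hi := by omega
    rw [hbase _ _ _ (by omega)]
    refine ⟨le_rfl, by omega, fun m hm => ⟨fun hx => ?_, fun hlo => h2 m hm (by omega)⟩⟩
    by_contra hnlo
    exact absurd hx (not_le.mpr (h1 m hm (by omega)))
  | succ n ih =>
    intro lo hi hf hlh hhM h1 h2
    by_cases hlt : lo < hi
    · rw [hstep _ _ _ hlt]
      have hmidM : (lo+hi)/2 < pvM seq.length := by omega
      have hJ : (((List.range (pvM seq.length)).map (pvJval seq)).getD ((lo+hi)/2) 0)
          = pvJval seq ((lo+hi)/2) := by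
        simp [List.getD, hmidM]
      rw [hJ]
      split
      · rename_i hcase
        have h1' : ∀ m, m < pvM seq.length → m < (lo+hi)/2+1 → pvJval seq m < x :=
          fun m hm hmlt => lt_of_le_of_lt (pvJval_mono seq (by omega)) hcase
        have := ih ((lo+hi)/2+1) hi (by omega) (by omega) hhM h1' h2
        exact ⟨by omega, this.2.1, this.2.2⟩
      · rename_i hcase
        have h2' : ∀ m, m < pvM seq.length → (lo+hi)/2 ≤ m → x ≤ pvJval seq m :=
          fun m hm hmge => le_trans (not_lt.mp hcase) (pvJval_mono seq hmge)
        have := ih lo ((lo+hi)/2) (by omega) (by omega) (by omega) h1 h2'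
        exact ⟨this.1, by omega, this.2.2⟩
    · rw [hbase _ _ _ hlt]
      refine ⟨le_rfl, by omega, fun m hm => ⟨fun hx => ?_, fun hlo => h2 m hm (by omega)⟩⟩
      by_contra hnlo
      exact absurd hx (not_le.mpr (h1 m hm (by omega)))

/-- B's per-slim unconditional fold over `[lo, hi)` equals the conditional spec fold over all blocks. -/
lemma pvB_inner_eq (code : String) (start fin : Int) (seq : List String) (s : List String) :
    (List.range' (pvB_lower ((List.range (pvM seq.length)).map (pvJval seq)) start 0 (pvM seq.length))
        ((pvB_lower ((List.range (pvM seq.length)).map (pvJval seq)) (fin + 1) 0 (pvM seq.length))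
          - (pvB_lower ((List.range (pvM seq.length)).map (pvJval seq)) start 0 (pvM seq.length)))).foldl
      (fun s m => pvB_write code s m) s
    = (List.range' 0 (pvM seq.length)).foldl (pvStep code start fin seq) s := by
  have hs := pvB_lower_spec seq start (pvM seq.length) 0 (pvM seq.length) le_rfl (Nat.zero_le _)
    le_rfl (fun m hm h => by omega) (fun m hm h => by omega)
  have he := pvB_lower_spec seq (fin + 1) (pvM seq.length) 0 (pvM seq.length) le_rfl (Nat.zero_le _)
    le_rfl (fun m hm h => by omega) (fun m hm h => by omega)
  set lo := pvB_lower ((List.range (pvM seq.length)).map (pvJval seq)) start 0 (pvM seq.length) with hlo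
  set hi := pvB_lower ((List.range (pvM seq.length)).map (pvJval seq)) (fin + 1) 0 (pvM seq.length) with hhi
  obtain ⟨-, hsM, hsc⟩ := hs
  obtain ⟨-, heM, hec⟩ := he
  by_cases hord : hi ≤ lo
  · rw [Nat.sub_eq_zero_of_le hord]
    simp only [List.range'_zero, List.foldl_nil]
    refine (pvFoldl_id _ _ _ ?_).symm
    intro m hm s'
    have hmM : m < pvM seq.length := by
      have := (List.mem_range'_1.mp hm).2; omega
    unfold pvStep
    rw [if_neg]
    rintro ⟨ha, hb⟩
    have h1 := (hsc m hmM).mp ha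
    have h2 := (hec m hmM).mpr (by omega)
    omega
  · rw [Nat.not_le] at hord
    have e1 : (List.range' 0 lo).foldl (pvStep code start fin seq) s = s := by
      refine pvFoldl_id _ _ _ ?_
      intro m hm s'
      have hmlo : m < lo := by have := (List.mem_range'_1.mp hm).2; omega
      have hmM : m < pvM seq.length := by omega
      unfold pvStep
      rw [if_neg]
      rintro ⟨ha, -⟩
      exact absurd ((hsc m hmM).mp ha) (by omega)
    have e3 : ∀ X, (List.range' hi (pvM seq.length - hi)).foldl (pvStep code start fin seq) X = X := by
      intro X
      refine pvFoldl_id _ _ _ ?_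
      intro m hm s'
      have hmhi : hi ≤ m ∧ m < pvM seq.length := by
        have h := List.mem_range'_1.mp hm; omega
      unfold pvStep
      rw [if_neg]
      rintro ⟨-, hb⟩
      exact absurd ((hec m hmhi.2).mpr hmhi.1) (by omega)
    have e2 : (List.range' lo (hi - lo)).foldl (fun s m => pvB_write code s m) s
        = (List.range' lo (hi - lo)).foldl (pvStep code start fin seq) s := by
      refine (PySem.List.foldl_congr_mem _ _ _ _ ?_).symm
      intro acc m hm
      have hrng : lo ≤ m ∧ m < hi := by
        have h := List.mem_range'_1.mp hm; omega
      have hmM : m < pvM seq.length := by omega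
      unfold pvStep
      rw [if_pos]
      refine ⟨(hsc m hmM).mpr hrng.1, ?_⟩
      have := fun h => (hec m hmM).mp h
      by_contra hbad
      exact absurd ((hec m hmM).mpr (by omega)) (by omega)
    have hdecomp : List.range' 0 (pvM seq.length)
        = (List.range' 0 lo ++ List.range' lo (hi - lo)) ++ List.range' hi (pvM seq.length - hi) := by
      have h1 : List.range' 0 lo ++ List.range' (0 + 1 * lo) (hi - lo) = List.range' 0 (lo + (hi - lo)) :=
        List.range'_append
      have h2 : List.range' 0 hi ++ List.range' (0 + 1 * hi) (pvM seq.length - hi)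
          = List.range' 0 (hi + (pvM seq.length - hi)) := List.range'_append
      simp only [Nat.zero_add, Nat.one_mul] at h1 h2
      rw [show lo + (hi - lo) = hi from by omega] at h1
      rw [show hi + (pvM seq.length - hi) = pvM seq.length from by omega] at h2
      rw [← h2, ← h1]
    rw [e2, hdecomp, List.foldl_append, List.foldl_append, e1, e3]

/-- the spec fold preserves length and the residue cells (they sit at `≡ 5, 6 (mod 7)`). -/
lemma pvStep_invar (code : String) (start fin : Int) (seq : List String) (l : List Nat) :
    ∀ s, s.length = seq.length → (∀ t, 7*t < seq.length → s.getD (7*t) "" = seq.getD (7*t) "") →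
      (l.foldl (pvStep code start fin seq) s).length = seq.length ∧
      (∀ t, 7*t < seq.length → (l.foldl (pvStep code start fin seq) s).getD (7*t) "" = seq.getD (7*t) "") := by
  induction l with
  | nil => exact fun s h1 h2 => ⟨h1, h2⟩
  | cons x xs ih =>
    intro s h1 h2
    simp only [List.foldl_cons]
    exact ih _ ((pvStep_len code start fin seq s x).trans h1)
      (fun t ht => (pvStep_getD code start fin seq s x t).trans (h2 t ht))

/-- outer loops agree: A's indexed fold with `slim_codes[i]` versus B's `zip` fold. -/
lemma pvOuter_eq (seq : List String) (codes : List String) :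
    ∀ (sl : List (List Int)) (k : Nat) s, s.length = seq.length →
      (∀ t, 7*t < seq.length → s.getD (7*t) "" = seq.getD (7*t) "") →
      (∀ i, i < sl.length → sl.getD i [] ≠ [] → k + i < codes.length) →
      (PySem.List.enumerate sl (k : Int)).foldl
        (fun s p =>
          if p.2.length > 0 then
            pvA_loop (PySem.List.pyGetD codes p.1 "") (p.2.getD 0 0) (p.2.getD 1 0) s 0 0
          else s) s
      = (sl.zip (codes.drop k)).foldl
        (fun s q =>
          if q.1.length > 0 then
            (List.range' (pvB_lower ((List.range (pvM seq.length)).map (pvJval seq)) (q.1.getD 0 0) 0 (pvM seq.length))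
                ((pvB_lower ((List.range (pvM seq.length)).map (pvJval seq)) (q.1.getD 1 0 + 1) 0 (pvM seq.length))
                  - (pvB_lower ((List.range (pvM seq.length)).map (pvJval seq)) (q.1.getD 0 0) 0 (pvM seq.length)))).foldl
              (fun s m => pvB_write q.2 s m) s
          else s) s := by
  intro sl
  induction sl with
  | nil =>
    intro k s _ _ _
    simp [PySem.List.enumerate_nil]
  | cons x xs ih =>
    intro k s hlen hagree hcode
    rw [PySem.List.enumerate_cons, List.foldl_cons]
    have hcast : ((k : Int) + 1) = (((k+1 : Nat)) : Int) := by push_cast; ring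
    by_cases hx : x.length > 0
    · have hk : k < codes.length := by
        have := hcode 0 (by simp) (by
          simp only [List.getD_cons_zero]
          intro hxe; rw [hxe] at hx; simp at hx)
        omega
      have hdrop : codes.drop k = codes[k] :: codes.drop (k+1) := (List.getElem_cons_drop hk).symm
      rw [hdrop, List.zip_cons_cons, List.foldl_cons, if_pos hx, if_pos hx]
      have hA : pvA_loop (PySem.List.pyGetD codes ((k : Int)) "") (x.getD 0 0) (x.getD 1 0) s 0 0
          = (List.range' 0 (pvM seq.length)).foldl (pvStep codes[k] (x.getD 0 0) (x.getD 1 0) seq) s := by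
        rw [PySem.List.pyGetD_natCast, List.getD_eq_getElem codes "" hk]
        have h0 := pvA_loop_eq codes[k] (x.getD 0 0) (x.getD 1 0) seq 0 s hlen hagree
        simpa using h0
      rw [hA, pvB_inner_eq]
      obtain ⟨hlen1, hagree1⟩ := pvStep_invar codes[k] (x.getD 0 0) (x.getD 1 0) seq
        (List.range' 0 (pvM seq.length)) s hlen hagree
      rw [hcast]
      refine ih (k+1) _ hlen1 hagree1 ?_
      intro i hi hne
      have := hcode (i+1) (by simpa using Nat.succ_lt_succ hi) (by simpa using hne)
      omega
    · rw [if_neg hx]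
      cases hdk : codes.drop k with
      | nil =>
        have hcl : codes.length ≤ k := List.drop_eq_nil_iff.mp hdk
        rw [List.zip_nil_right]
        simp only [List.foldl_nil]
        refine pvFoldl_id _ _ _ ?_
        intro p hp s'
        obtain ⟨i, hi, rfl⟩ := (PySem.List.mem_enumerate_iff _ _ _).mp hp
        have hie : xs.getD i [] = [] := by
          by_contra hne
          have := hcode (i+1) (by simpa using Nat.succ_lt_succ hi) (by simpa using hne)
          omega
        rw [List.getD_eq_getElem xs [] hi] at hie
        rw [if_neg]
        simp [hie]
      | cons c rest =>
        have hrest : rest = codes.drop (k+1) := by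
          rw [← List.tail_drop, hdk]
          rfl
        rw [List.zip_cons_cons, List.foldl_cons, if_neg hx, hcast, hrest]
        refine ih (k+1) s hlen hagree ?_
        intro i hi hne
        have := hcode (i+1) (by simpa using Nat.succ_lt_succ hi) (by simpa using hne)
        omega

-- ===== VERDICT (by name: the statement is the Claim_ definition above) =====
theorem encode_slims_spec : Claim_equal_encode_slims := by
  intro seq slims slim_codes hdom hpre
  unfold Spec_encode_slims
  show encode_slims seq slims slim_codes = encode_slims_alt seq slims slim_codes
  unfold encode_slims encode_slims_alt
  rw [pvB_profile_spec]
  simp only [List.length_map, List.length_range]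
  have h := pvOuter_eq seq slim_codes slims 0 seq rfl (fun t _ => rfl) (fun i hi hne => by
    have := (hpre i (List.mem_range.mpr hi) hne).2.1
    omega)
  simpa using h
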